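-- pv_equiv track=rewrite | github.com/jacchuynh/textAI | backend/src/game_engine/economy_system.py | _determine_shop_type
-- ===== SOURCE A (Python) =====
-- def _determine_shop_type(shop_name: str) -> str:
--     """Determine shop type from name."""
--     shop_name_lower = shop_name.lower()
--
--     if any(term in shop_name_lower for term in ["potion", "elixir", "remedy", "healing", "cauldron"]):
--         return "apothecary"
--     elif any(term in shop_name_lower for term in ["sword", "armor", "anvil", "forge", "armory"]):
--         return "weaponsmith"
--     elif any(term in shop_name_lower for term in ["magic", "arcane", "spell", "wizard"]):
--         return "magical goods"
--     elif any(term in shop_name_lower for term in ["cloth", "outfit", "garment", "tailor"]):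
--         return "clothing"
--     elif any(term in shop_name_lower for term in ["gem", "gold", "silver", "jewel"]):
--         return "jewelry"
--     elif any(term in shop_name_lower for term in ["device", "gadget", "artifice", "clockwork"]):
--         return "gadgets"
--     elif any(term in shop_name_lower for term in ["food", "drink", "tavern", "inn"]):
--         return "food and drink"
--     else:
--         return "general goods"
-- ===== SOURCE B (Python) =====
-- _SHOP_TYPES = ["apothecary", "weaponsmith", "magical goods", "clothing",
--                "jewelry", "gadgets", "food and drink", "general goods"]
--
-- _KEYWORD_PRIORITY = {
--     "potion": 0, "elixir": 0, "remedy": 0, "healing": 0, "cauldron": 0,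
--     "sword": 1, "armor": 1, "anvil": 1, "forge": 1, "armory": 1,
--     "magic": 2, "arcane": 2, "spell": 2, "wizard": 2,
--     "cloth": 3, "outfit": 3, "garment": 3, "tailor": 3,
--     "gem": 4, "gold": 4, "silver": 4, "jewel": 4,
--     "device": 5, "gadget": 5, "artifice": 5, "clockwork": 5,
--     "food": 6, "drink": 6, "tavern": 6, "inn": 6,
-- }
--
--
-- def _determine_shop_type(shop_name: str) -> str:
--     """Determine shop type by sliding a window over the lowercased name:
--     every substring of keyword length (3..9) is looked up in a keyword
--     table and the best (lowest) matched priority wins."""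
--     s = shop_name.lower()
--     best = 7  # "general goods"
--     for i in range(len(s)):
--         for length in range(3, 10):
--             p = _KEYWORD_PRIORITY.get(s[i:i + length])
--             if p is not None and p < best:
--                 best = p
--     return _SHOP_TYPES[best]
-- ===== Notes on version B (the rewrite author's own statement) =====
-- stated objective: alternative
-- what changed: Instead of searching the name for each keyword branch by branch, B slides a window over the lowercased name once, hash-looks each length-3..9 substring up in a keyword-to-priority dict, and returns the type of the minimum matched priority.
import Mathlib
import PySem

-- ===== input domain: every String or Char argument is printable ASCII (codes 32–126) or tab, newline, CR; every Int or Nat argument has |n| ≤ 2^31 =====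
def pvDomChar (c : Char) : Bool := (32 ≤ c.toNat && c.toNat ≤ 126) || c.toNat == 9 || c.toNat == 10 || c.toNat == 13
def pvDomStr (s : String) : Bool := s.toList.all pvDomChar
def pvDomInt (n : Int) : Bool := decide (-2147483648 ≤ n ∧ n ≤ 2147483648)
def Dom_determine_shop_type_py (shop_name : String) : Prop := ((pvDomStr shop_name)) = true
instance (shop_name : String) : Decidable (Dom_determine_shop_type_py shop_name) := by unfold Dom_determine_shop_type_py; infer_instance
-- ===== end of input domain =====

-- B replaces A's per-keyword substring searches by a single window scan over the
-- lowercased name with a keyword→priority dictionary (alternative algorithm, same cost class).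

-- ===== PORT A =====
def determine_shop_type_py (shop_name : String) : String :=
  let shop_name_lower := PySem.Str.lower shop_name
  if ["potion", "elixir", "remedy", "healing", "cauldron"].any
      (fun term => PySem.Str.isIn term shop_name_lower) then "apothecary"
  else if ["sword", "armor", "anvil", "forge", "armory"].any
      (fun term => PySem.Str.isIn term shop_name_lower) then "weaponsmith"
  else if ["magic", "arcane", "spell", "wizard"].any
      (fun term => PySem.Str.isIn term shop_name_lower) then "magical goods"
  else if ["cloth", "outfit", "garment", "tailor"].any
      (fun term => PySem.Str.isIn term shop_name_lower) then "clothing"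
  else if ["gem", "gold", "silver", "jewel"].any
      (fun term => PySem.Str.isIn term shop_name_lower) then "jewelry"
  else if ["device", "gadget", "artifice", "clockwork"].any
      (fun term => PySem.Str.isIn term shop_name_lower) then "gadgets"
  else if ["food", "drink", "tavern", "inn"].any
      (fun term => PySem.Str.isIn term shop_name_lower) then "food and drink"
  else "general goods"

-- ===== PORT B =====
def shopTypesB : List String :=
  ["apothecary", "weaponsmith", "magical goods", "clothing",
   "jewelry", "gadgets", "food and drink", "general goods"]

def shopKeywordPriority : PySem.Dict String Nat := PySem.Dict.mk
  [("potion", 0), ("elixir", 0), ("remedy", 0), ("healing", 0), ("cauldron", 0),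
   ("sword", 1), ("armor", 1), ("anvil", 1), ("forge", 1), ("armory", 1),
   ("magic", 2), ("arcane", 2), ("spell", 2), ("wizard", 2),
   ("cloth", 3), ("outfit", 3), ("garment", 3), ("tailor", 3),
   ("gem", 4), ("gold", 4), ("silver", 4), ("jewel", 4),
   ("device", 5), ("gadget", 5), ("artifice", 5), ("clockwork", 5),
   ("food", 6), ("drink", 6), ("tavern", 6), ("inn", 6)]

-- one window step of Source B's inner loop: look s[i:i+L] up, keep the smaller priority
def bWindowStep (s : List Char) (best : Nat) (q : Nat × Nat) : Nat :=
  match shopKeywordPriority.get? (String.ofList ((s.drop q.1).take q.2)) with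
  | some p => if p < best then p else best
  | none => best

-- Source B's two nested loops: for i in range(len(s)): for L in range(3, 10): …
def bBest (s : List Char) : Nat :=
  (List.range s.length).foldl (fun best i =>
    (List.range' 3 7).foldl (fun best L => bWindowStep s best (i, L)) best) 7

def determine_shop_type_py_alt (shop_name : String) : String :=
  -- bBest starts at 7 and never increases, so the index is always in range and getD's default is never used
  shopTypesB.getD (bBest (PySem.Str.lower shop_name).toList) ""

-- ===== PRECONDITION & SPEC =====
def Spec_determine_shop_type_py (shop_name : String) (out : String) : Prop := out = determine_shop_type_py_alt shop_name
instance (shop_name : String) (out : String) : Decidable (Spec_determine_shop_type_py shop_name out) := by unfold Spec_determine_shop_type_py; infer_instance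

-- ===== CLAIM (what is proved, stated in full; the proofs are below) =====
def Claim_equal_determine_shop_type_py : Prop := ∀ (shop_name : String), Dom_determine_shop_type_py shop_name → Spec_determine_shop_type_py shop_name (determine_shop_type_py shop_name)

-- ===== LEMMAS AND PROOFS =====

-- "some keyword of priority p occurs in s"
def shopMatch (s : List Char) (p : Nat) : Prop :=
  ∃ t : String, (t, p) ∈ shopKeywordPriority.items ∧ t.toList <:+: s

lemma shopKeys_nodup : shopKeywordPriority.keys.Nodup := by decide

lemma shopTable_len : ∀ tp ∈ shopKeywordPriority.items,
    3 ≤ tp.1.toList.length ∧ tp.1.toList.length ≤ 9 := by decide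

lemma shopTable_pri : ∀ tp ∈ shopKeywordPriority.items, tp.2 ≤ 6 := by decide

-- the window pairs Source B's nested loops run over
def shopPairs (s : List Char) : List (Nat × Nat) :=
  (List.range s.length).flatMap (fun i => (List.range' 3 7).map (fun L => (i, L)))

lemma foldl_nested (s : List Char) (xs : List Nat) (b : Nat) :
    xs.foldl (fun best i => (List.range' 3 7).foldl (fun best L => bWindowStep s best (i, L)) best) b
      = (xs.flatMap (fun i => (List.range' 3 7).map (fun L => (i, L)))).foldl (bWindowStep s) b := by
  induction xs generalizing b with
  | nil => rfl
  | cons x xs ih => simp [List.flatMap_cons, List.foldl_append, List.foldl_map, ih]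

lemma bBest_eq_foldl (s : List Char) : bBest s = (shopPairs s).foldl (bWindowStep s) 7 := by
  unfold bBest shopPairs
  exact foldl_nested s _ 7

-- the fold keeps the minimum looked-up priority (never above the start value)
lemma bFold_spec (s : List Char) (qs : List (Nat × Nat)) (b0 : Nat) :
    qs.foldl (bWindowStep s) b0 ≤ b0 ∧
    (qs.foldl (bWindowStep s) b0 = b0 ∨
      ∃ q ∈ qs, shopKeywordPriority.get? (String.ofList ((s.drop q.1).take q.2)) =
        some (qs.foldl (bWindowStep s) b0)) ∧
    (∀ q ∈ qs, ∀ p, shopKeywordPriority.get? (String.ofList ((s.drop q.1).take q.2)) = some p →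
      qs.foldl (bWindowStep s) b0 ≤ p) := by
  induction qs generalizing b0 with
  | nil => simp
  | cons q rest ih =>
    have hstep : bWindowStep s b0 q ≤ b0 := by
      unfold bWindowStep
      split
      · split_ifs <;> omega
      · exact le_rfl
    obtain ⟨ih1, ih2, ih3⟩ := ih (bWindowStep s b0 q)
    simp only [List.foldl_cons]
    refine ⟨le_trans ih1 hstep, ?_, ?_⟩
    · rcases ih2 with h | ⟨q', hq', hlook⟩
      · rw [h]
        rcases hlo : shopKeywordPriority.get? (String.ofList ((s.drop q.1).take q.2)) with _ | p
        · left
          simp [bWindowStep, hlo]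
        · by_cases hp : p < b0
          · right
            refine ⟨q, List.mem_cons_self .., ?_⟩
            rw [hlo]
            have : bWindowStep s b0 q = p := by simp [bWindowStep, hlo, hp]
            rw [this]
          · left
            simp [bWindowStep, hlo, hp]
      · right
        exact ⟨q', List.mem_cons_of_mem _ hq', hlook⟩
    · intro q' hq' p hlook
      rcases List.mem_cons.mp hq' with rfl | hmem
      · have h1 : bWindowStep s b0 q' ≤ p := by
          simp only [bWindowStep, hlook]
          split_ifs <;> omega
        exact le_trans ih1 h1
      · exact ih3 q' hmem p hlook

-- looked-up windows are exactly the keyword occurrences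
lemma shopMatch_iff_window (s : List Char) (p : Nat) :
    shopMatch s p ↔ ∃ q ∈ shopPairs s,
      shopKeywordPriority.get? (String.ofList ((s.drop q.1).take q.2)) = some p := by
  constructor
  · rintro ⟨t, hmem, hinf⟩
    obtain ⟨hlen3, hlen9⟩ := shopTable_len (t, p) hmem
    dsimp only at hlen3 hlen9
    obtain ⟨u, v, huv⟩ := hinf
    have hpre : t.toList <+: s.drop u.length := by
      rw [← huv, List.append_assoc, List.drop_left]
      exact ⟨v, rfl⟩
    have hlt : u.length < s.length := by
      rw [← huv]
      simp only [List.length_append]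
      omega
    refine ⟨(u.length, t.toList.length), ?_, ?_⟩
    · simp only [shopPairs, List.mem_flatMap, List.mem_map, List.mem_range, List.mem_range'_1]
      exact ⟨u.length, hlt, t.toList.length, ⟨hlen3, by omega⟩, rfl⟩
    · have htake : (s.drop u.length).take t.toList.length = t.toList :=
        (List.prefix_iff_eq_take.mp hpre).symm
      dsimp only
      rw [htake, String.ofList_toList]
      exact (PySem.Dict.get?_eq_some_iff_mem_items _ _ _ shopKeys_nodup).mpr hmem
  · rintro ⟨⟨i, L⟩, _, hlook⟩
    refine ⟨String.ofList ((s.drop i).take L),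
      (PySem.Dict.get?_eq_some_iff_mem_items _ _ _ shopKeys_nodup).mp hlook, ?_⟩
    rw [String.toList_ofList]
    exact ((s.drop i).take_prefix L).isInfix.trans (s.drop_suffix i).isInfix

-- full characterisation of bBest
lemma bBest_spec (s : List Char) :
    bBest s ≤ 7 ∧ (bBest s = 7 ∨ shopMatch s (bBest s)) ∧
    (∀ p, shopMatch s p → bBest s ≤ p) := by
  rw [bBest_eq_foldl]
  obtain ⟨h1, h2, h3⟩ := bFold_spec s (shopPairs s) 7
  refine ⟨h1, ?_, ?_⟩
  · rcases h2 with h | ⟨q, hq, hl⟩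
    · exact Or.inl h
    · exact Or.inr ((shopMatch_iff_window s _).mpr ⟨q, hq, hl⟩)
  · intro p hp
    obtain ⟨q, hq, hl⟩ := (shopMatch_iff_window s p).mp hp
    exact h3 q hq p hl

-- A's group conditions, each ↔ "a keyword of that priority occurs"
lemma group0_iff (lo : String) :
    (["potion", "elixir", "remedy", "healing", "cauldron"].any
      (fun term => PySem.Str.isIn term lo) = true) ↔ shopMatch lo.toList 0 := by
  simp [shopMatch, shopKeywordPriority, PySem.Chars.isIn_iff_infix]

lemma group1_iff (lo : String) :
    (["sword", "armor", "anvil", "forge", "armory"].any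
      (fun term => PySem.Str.isIn term lo) = true) ↔ shopMatch lo.toList 1 := by
  simp [shopMatch, shopKeywordPriority, PySem.Chars.isIn_iff_infix]

lemma group2_iff (lo : String) :
    (["magic", "arcane", "spell", "wizard"].any
      (fun term => PySem.Str.isIn term lo) = true) ↔ shopMatch lo.toList 2 := by
  simp [shopMatch, shopKeywordPriority, PySem.Chars.isIn_iff_infix]

lemma group3_iff (lo : String) :
    (["cloth", "outfit", "garment", "tailor"].any
      (fun term => PySem.Str.isIn term lo) = true) ↔ shopMatch lo.toList 3 := by
  simp [shopMatch, shopKeywordPriority, PySem.Chars.isIn_iff_infix]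

lemma group4_iff (lo : String) :
    (["gem", "gold", "silver", "jewel"].any
      (fun term => PySem.Str.isIn term lo) = true) ↔ shopMatch lo.toList 4 := by
  simp [shopMatch, shopKeywordPriority, PySem.Chars.isIn_iff_infix]

lemma group5_iff (lo : String) :
    (["device", "gadget", "artifice", "clockwork"].any
      (fun term => PySem.Str.isIn term lo) = true) ↔ shopMatch lo.toList 5 := by
  simp [shopMatch, shopKeywordPriority, PySem.Chars.isIn_iff_infix]

lemma group6_iff (lo : String) :
    (["food", "drink", "tavern", "inn"].any
      (fun term => PySem.Str.isIn term lo) = true) ↔ shopMatch lo.toList 6 := by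
  simp [shopMatch, shopKeywordPriority, PySem.Chars.isIn_iff_infix]

lemma no_match_seven (s : List Char) : ¬ shopMatch s 7 := by
  rintro ⟨t, hmem, -⟩
  have := shopTable_pri _ hmem
  omega

-- ===== VERDICT (by name: the statement is the Claim_ definition above) =====
theorem determine_shop_type_py_spec : Claim_equal_determine_shop_type_py := by
  intro name _
  unfold Spec_determine_shop_type_py determine_shop_type_py determine_shop_type_py_alt
  set lo := PySem.Str.lower name with hlo
  obtain ⟨hb1, hb2, hb3⟩ := bBest_spec lo.toList
  set r := bBest lo.toList with hr
  dsimp only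
  split_ifs with h0 h1 h2 h3 h4 h5 h6
  · have hq : r = 0 := Nat.le_zero.mp (hb3 0 ((group0_iff lo).mp h0))
    rw [hq]; rfl
  · have hle : r ≤ 1 := hb3 1 ((group1_iff lo).mp h1)
    have hq : r = 1 := by
      rcases hb2 with h | hm
      · omega
      · interval_cases r
        · exact absurd ((group0_iff lo).mpr hm) h0
        · rfl
    rw [hq]; rfl
  · have hle : r ≤ 2 := hb3 2 ((group2_iff lo).mp h2)
    have hq : r = 2 := by
      rcases hb2 with h | hm
      · omega
      · interval_cases r
        · exact absurd ((group0_iff lo).mpr hm) h0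
        · exact absurd ((group1_iff lo).mpr hm) h1
        · rfl
    rw [hq]; rfl
  · have hle : r ≤ 3 := hb3 3 ((group3_iff lo).mp h3)
    have hq : r = 3 := by
      rcases hb2 with h | hm
      · omega
      · interval_cases r
        · exact absurd ((group0_iff lo).mpr hm) h0
        · exact absurd ((group1_iff lo).mpr hm) h1
        · exact absurd ((group2_iff lo).mpr hm) h2
        · rfl
    rw [hq]; rfl
  · have hle : r ≤ 4 := hb3 4 ((group4_iff lo).mp h4)
    have hq : r = 4 := by
      rcases hb2 with h | hm
      · omega
      · interval_cases r
        · exact absurd ((group0_iff lo).mpr hm) h0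
        · exact absurd ((group1_iff lo).mpr hm) h1
        · exact absurd ((group2_iff lo).mpr hm) h2
        · exact absurd ((group3_iff lo).mpr hm) h3
        · rfl
    rw [hq]; rfl
  · have hle : r ≤ 5 := hb3 5 ((group5_iff lo).mp h5)
    have hq : r = 5 := by
      rcases hb2 with h | hm
      · omega
      · interval_cases r
        · exact absurd ((group0_iff lo).mpr hm) h0
        · exact absurd ((group1_iff lo).mpr hm) h1
        · exact absurd ((group2_iff lo).mpr hm) h2
        · exact absurd ((group3_iff lo).mpr hm) h3
        · exact absurd ((group4_iff lo).mpr hm) h4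
        · rfl
    rw [hq]; rfl
  · have hle : r ≤ 6 := hb3 6 ((group6_iff lo).mp h6)
    have hq : r = 6 := by
      rcases hb2 with h | hm
      · omega
      · interval_cases r
        · exact absurd ((group0_iff lo).mpr hm) h0
        · exact absurd ((group1_iff lo).mpr hm) h1
        · exact absurd ((group2_iff lo).mpr hm) h2
        · exact absurd ((group3_iff lo).mpr hm) h3
        · exact absurd ((group4_iff lo).mpr hm) h4
        · exact absurd ((group5_iff lo).mpr hm) h5
        · rfl
    rw [hq]; rfl
  · have hq : r = 7 := by
      rcases hb2 with h | hm
      · exact h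
      · interval_cases r
        · exact absurd ((group0_iff lo).mpr hm) h0
        · exact absurd ((group1_iff lo).mpr hm) h1
        · exact absurd ((group2_iff lo).mpr hm) h2
        · exact absurd ((group3_iff lo).mpr hm) h3
        · exact absurd ((group4_iff lo).mpr hm) h4
        · exact absurd ((group5_iff lo).mpr hm) h5
        · exact absurd ((group6_iff lo).mpr hm) h6
        · exact absurd hm (no_match_seven lo.toList)
    rw [hq]; rfl
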